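-- pv_equiv track=rewrite | github.com/oimeitei/fragpy | fragpy/simple_maths.py | makeblist
-- ===== SOURCE A (Python) =====
-- def makeblist(nf):
--      bondlist = []
--      bond_tmp = []
--      bcoef = []
--
--      for i in range(nf-1):
--           for j in bondlist:
--                if i+1 in j:
--                     bond_tmp.append(i+1)
--                elif i+2 in j:
--                     bon_tmp.append(i+2)
--           bondlist.append([i+1,i+2])
--           bcoef.append(1)
--      for i in bond_tmp:
--           bondlist.append([i,0])
--           bcoef.append(-1)
--      return(bondlist,bcoef)
-- ===== SOURCE B (Python) =====
-- def makeblist(nf):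
--     bonds = [[i, i + 1] for i in range(1, nf)]
--     closures = [[i, 0] for i in range(2, nf)]
--     return (bonds + closures, [1] * len(bonds) + [-1] * len(closures))
-- ===== Notes on version B (the rewrite author's own statement) =====
-- stated objective: faster
-- what changed: A rescans the whole growing bond list at every step to discover that i+1 lies in exactly the previous bond; B builds the consecutive bonds, the [i,0] closure bonds and the coefficient list directly from ranges in one pass.
import Mathlib
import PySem

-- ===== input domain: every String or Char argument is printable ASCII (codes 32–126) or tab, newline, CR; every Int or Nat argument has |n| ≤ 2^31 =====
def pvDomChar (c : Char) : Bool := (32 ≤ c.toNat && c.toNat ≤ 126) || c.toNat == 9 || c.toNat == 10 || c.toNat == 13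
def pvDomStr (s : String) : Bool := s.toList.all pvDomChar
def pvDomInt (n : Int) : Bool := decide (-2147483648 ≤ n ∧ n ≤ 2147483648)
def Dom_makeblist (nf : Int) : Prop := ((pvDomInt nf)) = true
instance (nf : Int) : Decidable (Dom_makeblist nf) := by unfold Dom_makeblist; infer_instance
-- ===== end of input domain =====

-- B replaces A's rescan of the growing bond list at every step by a direct
-- one-pass construction of both lists from ranges (objective: faster).

-- ===== PORT A =====
-- Note on the dead 'elif': on that branch Python appends to the undefined name
-- 'bon_tmp' (a typo in A) and would raise NameError; the branch is unreachable
-- (no earlier bond contains i+2, lemma makeblist_innerId below), so it is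
-- ported as a no-op.
def makeblist (nf : Int) : List (List Int) × List Int :=
  let s :=
    (PySem.List.pyRange 0 (nf - 1) 1).foldl
      (fun (s : List (List Int) × List Int × List Int) i =>
        let bt := s.1.foldl
          (fun bt j =>
            if j.contains (i + 1) then bt ++ [i + 1]
            else if j.contains (i + 2) then bt   -- unreachable: Python raises NameError here
            else bt)
          s.2.1
        (s.1 ++ [[i + 1, i + 2]], bt, s.2.2 ++ [1]))
      ([], [], [])
  let t :=
    s.2.1.foldl
      (fun (t : List (List Int) × List Int) i => (t.1 ++ [[i, 0]], t.2 ++ [-1]))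
      (s.1, s.2.2)
  t

-- ===== PORT B =====
def makeblist_alt (nf : Int) : List (List Int) × List Int :=
  let bonds := (PySem.List.pyRange 1 nf 1).map (fun i => [i, i + 1])
  let closures := (PySem.List.pyRange 2 nf 1).map (fun i => [i, 0])
  (bonds ++ closures,
   List.replicate bonds.length 1 ++ List.replicate closures.length (-1))

-- ===== PRECONDITION & SPEC =====
def Spec_makeblist (nf : Int) (out : List (List Int) × List Int) : Prop := out = makeblist_alt nf
instance (nf : Int) (out : List (List Int) × List Int) : Decidable (Spec_makeblist nf out) := by unfold Spec_makeblist; infer_instance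

-- ===== CLAIM (what is proved, stated in full; the proofs are below) =====
def Claim_equal_makeblist : Prop := ∀ (nf : Int), Dom_makeblist nf → Spec_makeblist nf (makeblist nf)

-- ===== LEMMAS AND PROOFS =====

-- bondlist after n iterations of A's first loop
def blA (n : Nat) : List (List Int) := (List.range n).map (fun (k : Nat) => [(k : Int) + 1, (k : Int) + 2])
-- bond_tmp after n iterations of A's first loop
def btA : Nat → List Int
  | 0 => []
  | n + 1 => (List.range n).map (fun (k : Nat) => (k : Int) + 2)

theorem blA_succ (n : Nat) : blA (n + 1) = blA n ++ [[(n : Int) + 1, (n : Int) + 2]] := by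
  simp [blA, List.range_succ]

theorem btA_succ (n : Nat) (h : 1 ≤ n) :
    btA (n + 1) = btA n ++ [(n : Int) + 1] := by
  cases n with
  | zero => omega
  | succ m =>
    simp only [btA]
    rw [List.range_succ, List.map_append]
    simp
    omega

theorem contains_pair_iff (a b x : Int) : ([a, b].contains x = true) ↔ (x = a ∨ x = b) := by
  simp [List.contains_eq_mem]

-- A's inner scan over bonds built strictly before step i-1 is the identity
theorem makeblist_innerId (i : Int) (m : Nat) (h : (m : Int) + 1 ≤ i) (bt : List Int) :
    (blA m).foldl
      (fun bt j =>
        if j.contains (i + 1) then bt ++ [i + 1]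
        else if j.contains (i + 2) then bt
        else bt) bt = bt := by
  induction m generalizing bt with
  | zero => simp [blA]
  | succ m ih =>
    rw [blA_succ, List.foldl_append]
    rw [ih (by push_cast at h ⊢; omega)]
    have hm : (m : Int) + 2 ≤ i := by push_cast at h; omega
    have h1 : ¬ ([(m : Int) + 1, (m : Int) + 2].contains (i + 1) = true) := by
      rw [contains_pair_iff]; omega
    have h2 : ¬ ([(m : Int) + 1, (m : Int) + 2].contains (i + 2) = true) := by
      rw [contains_pair_iff]; omega
    simp only [List.foldl_cons, List.foldl_nil, if_neg h1, if_neg h2]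

-- A's inner scan at step i = n over blA n appends n+1 exactly when n ≥ 1
theorem makeblist_inner (n : Nat) (bt : List Int) :
    (blA n).foldl
      (fun bt j =>
        if j.contains ((n : Int) + 1) then bt ++ [(n : Int) + 1]
        else if j.contains ((n : Int) + 2) then bt
        else bt) bt = if n = 0 then bt else bt ++ [(n : Int) + 1] := by
  cases n with
  | zero => simp [blA]
  | succ m =>
    push_cast
    rw [blA_succ, List.foldl_append,
      makeblist_innerId ((m : Int) + 1) m (by omega) bt]
    have h1 : ([(m : Int) + 1, (m : Int) + 2].contains ((m : Int) + 1 + 1) = true) := by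
      rw [contains_pair_iff]; omega
    simp only [List.foldl_cons, List.foldl_nil, if_pos h1]

-- A's first loop, characterised
theorem makeblist_loop1 (n : Nat) :
    ((List.range n).map (fun (k : Nat) => (k : Int))).foldl
      (fun (s : List (List Int) × List Int × List Int) i =>
        (s.1 ++ [[i + 1, i + 2]],
         s.1.foldl
          (fun bt j =>
            if j.contains (i + 1) then bt ++ [i + 1]
            else if j.contains (i + 2) then bt
            else bt) s.2.1,
         s.2.2 ++ [1]))
      ([], [], [])
    = (blA n, btA n, List.replicate n (1 : Int)) := by
  induction n with
  | zero => simp [blA, btA]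
  | succ m ih =>
    rw [List.range_succ, List.map_append, List.foldl_append, ih]
    simp only [List.map_cons, List.map_nil, List.foldl_cons, List.foldl_nil]
    rw [makeblist_inner m (btA m), ← blA_succ]
    cases m with
    | zero => simp [btA, List.replicate]
    | succ k =>
      rw [btA_succ (k + 1) (by omega)]
      simp [List.replicate_succ']

-- A's second loop, characterised
theorem makeblist_loop2 (lst : List Int) (bl : List (List Int)) (bc : List Int) :
    lst.foldl
      (fun (t : List (List Int) × List Int) i => (t.1 ++ [[i, 0]], t.2 ++ [-1]))
      (bl, bc)
    = (bl ++ lst.map (fun i => [i, 0]), bc ++ List.replicate lst.length (-1)) := by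
  induction lst generalizing bl bc with
  | nil => simp
  | cons x xs ih => simp [ih, List.replicate_succ]

theorem makeblist_eq (nf : Int) : makeblist nf = makeblist_alt nf := by
  unfold makeblist makeblist_alt
  rw [PySem.List.pyRange_one 0 (nf - 1), PySem.List.pyRange_one 1 nf,
    PySem.List.pyRange_one 2 nf]
  have h0 : nf - 1 - 0 = nf - 1 := by ring
  rw [h0]
  simp only [zero_add]
  rw [makeblist_loop1 (nf - 1).toNat]
  dsimp only
  rw [makeblist_loop2 (btA (nf - 1).toNat) (blA (nf - 1).toNat)
    (List.replicate (nf - 1).toNat (1 : Int))]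
  have hn2 : (nf - 2).toNat = (nf - 1).toNat - 1 := by omega
  simp only [Prod.mk.injEq]
  constructor
  · congr 1
    · simp only [blA, List.map_map]
      apply List.map_congr_left
      intro k _
      simp only [Function.comp_apply, List.cons.injEq, and_true]
      constructor <;> omega
    · rw [hn2]
      cases h : (nf - 1).toNat with
      | zero => simp [btA]
      | succ m =>
        simp only [btA, List.map_map, Nat.add_sub_cancel]
        apply List.map_congr_left
        intro k _
        simp only [Function.comp_apply, List.cons.injEq, and_true]
        omega
  · congr 1
    · simp
    · rw [hn2]
      cases h : (nf - 1).toNat with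
      | zero => simp [btA]
      | succ m => simp [btA]

-- ===== VERDICT (by name: the statement is the Claim_ definition above) =====
theorem makeblist_spec : Claim_equal_makeblist := by
  intro nf _
  unfold Spec_makeblist
  exact makeblist_eq nf
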